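-- pv_equiv track=rewrite | github.com/84zume/AtCoder | contests/src/abc227/abc227_b/main.py | solve
-- ===== SOURCE A (Python) =====
-- def solve(N, S):
--     ans = []
--     for a in range(1, 400):
--         for b in range(1,400):
--             ans.append(4*a*b+3*a+3*b)
--     count = 0
--     for s in S:
--         if s in ans:
--             count += 1
--     return N-count
-- ===== SOURCE B (Python) =====
-- def solve(N, S):
--     count = 0
--     for s in S:
--         for a in range(1, 400):
--             num = s - 3 * a
--             den = 4 * a + 3
--             if num > 0 and num % den == 0 and 1 <= num // den <= 399:
--                 count += 1
--                 break
--     return N - count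
-- ===== Notes on version B (the rewrite author's own statement) =====
-- stated objective: faster
-- what changed: Replaces the 159201-entry table build plus a linear membership scan per element by a per-element search over a=1..399 with a divisibility check that solves for b directly.
import Mathlib
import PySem

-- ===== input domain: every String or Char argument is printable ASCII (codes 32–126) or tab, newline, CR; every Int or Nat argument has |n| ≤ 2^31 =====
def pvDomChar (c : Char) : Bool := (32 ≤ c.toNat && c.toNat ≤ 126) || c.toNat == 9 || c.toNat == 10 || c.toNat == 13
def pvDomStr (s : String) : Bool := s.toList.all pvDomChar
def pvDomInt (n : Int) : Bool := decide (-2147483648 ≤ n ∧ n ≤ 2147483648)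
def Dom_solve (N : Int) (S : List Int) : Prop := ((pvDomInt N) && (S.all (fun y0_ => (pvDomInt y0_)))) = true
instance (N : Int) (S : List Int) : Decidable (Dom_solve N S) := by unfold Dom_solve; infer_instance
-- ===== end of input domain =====

-- B replaces A's 399×399 table build and per-element linear membership scan by a
-- per-element divisor search over a (solve for b by divisibility); faster by a large constant factor.

-- ===== PORT A =====
-- the table 'ans' A builds once (list.append ported as Array.push so evaluation stays linear)
def pvAns : Array Int :=
  (PySem.List.pyRange 1 400 1).foldl
    (fun acc a => (PySem.List.pyRange 1 400 1).foldl
      (fun acc2 b => acc2.push (4*a*b + 3*a + 3*b)) acc) #[]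

def solve (N : Int) (S : List Int) : Int :=
  N - S.foldl (fun c s => if pvAns.contains s then c + 1 else c) 0

-- ===== PORT B =====
-- the inner 'for a in range(1,400): … break' of B: true iff some a yields a valid b
def pvHit (s : Int) : Bool :=
  (PySem.List.pyRange 1 400 1).any (fun a =>
    decide (0 < s - 3*a) &&
    decide (PySem.Int.mod (s - 3*a) (4*a + 3) = 0) &&
    decide (1 ≤ PySem.Int.floordiv (s - 3*a) (4*a + 3)) &&
    decide (PySem.Int.floordiv (s - 3*a) (4*a + 3) ≤ 399))

def solve_alt (N : Int) (S : List Int) : Int :=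
  N - S.foldl (fun c s => if pvHit s then c + 1 else c) 0

-- ===== PRECONDITION & SPEC =====
def Spec_solve (N : Int) (S : List Int) (out : Int) : Prop := out = solve_alt N S
instance (N : Int) (S : List Int) (out : Int) : Decidable (Spec_solve N S out) := by unfold Spec_solve; infer_instance

-- ===== CLAIM (what is proved, stated in full; the proofs are below) =====
def Claim_equal_solve : Prop := ∀ (N : Int) (S : List Int), Dom_solve N S → Spec_solve N S (solve N S)

-- ===== LEMMAS AND PROOFS =====

theorem pvAns_toList : pvAns.toList =
    (PySem.List.pyRange 1 400 1).flatMap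
      (fun a => (PySem.List.pyRange 1 400 1).map (fun b => 4*a*b + 3*a + 3*b)) := by
  unfold pvAns
  have hinner : ∀ (acc : Array Int) (a : Int),
      ((PySem.List.pyRange 1 400 1).foldl
        (fun acc2 b => acc2.push (4*a*b + 3*a + 3*b)) acc).toList
      = acc.toList ++ (PySem.List.pyRange 1 400 1).map (fun b => 4*a*b + 3*a + 3*b) := by
    intro acc a
    rw [← List.foldl_hom Array.toList
      (g₁ := fun acc2 b => acc2.push (4*a*b + 3*a + 3*b))
      (g₂ := fun acc2 b => acc2 ++ [4*a*b + 3*a + 3*b])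
      (fun x y => (Array.toList_push (xs := x)).symm)]
    rw [PySem.List.foldl_append_singleton_eq_map]
  rw [← List.foldl_hom Array.toList
    (g₁ := fun acc a => (PySem.List.pyRange 1 400 1).foldl
      (fun acc2 b => acc2.push (4*a*b + 3*a + 3*b)) acc)
    (g₂ := fun acc a => acc ++ (PySem.List.pyRange 1 400 1).map (fun b => 4*a*b + 3*a + 3*b))
    (fun x y => (hinner x y).symm)]
  rw [show (#[] : Array Int).toList = ([] : List Int) from rfl]
  rw [PySem.List.foldl_append_eq_flatMap, List.nil_append]

theorem mem_pvAns (s : Int) : pvAns.contains s = true ↔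
    ∃ a, (1 ≤ a ∧ a < 400) ∧ ∃ b, (1 ≤ b ∧ b < 400) ∧ 4*a*b + 3*a + 3*b = s := by
  have h : pvAns.contains s = true ↔ s ∈ pvAns.toList := by simp
  rw [h, pvAns_toList]
  simp [List.mem_flatMap, List.mem_map, PySem.List.mem_pyRange_one]

-- per-a: a valid b exists iff B's divisibility test passes
theorem hit_cond (a s : Int) (ha : 1 ≤ a) :
    (∃ b, (1 ≤ b ∧ b < 400) ∧ 4*a*b + 3*a + 3*b = s) ↔
    (0 < s - 3*a ∧ PySem.Int.mod (s - 3*a) (4*a + 3) = 0 ∧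
     1 ≤ PySem.Int.floordiv (s - 3*a) (4*a + 3) ∧
     PySem.Int.floordiv (s - 3*a) (4*a + 3) ≤ 399) := by
  have hden : (0:Int) < 4*a + 3 := by omega
  rw [PySem.Int.mod_eq_zero_iff_dvd, PySem.Int.floordiv_eq_ediv_of_pos hden]
  constructor
  · rintro ⟨b, ⟨hb1, hb2⟩, hs⟩
    have hnum : s - 3*a = b * (4*a + 3) := by linarith [hs]
    have hq : (s - 3*a) / (4*a + 3) = b := by
      rw [hnum]; exact Int.mul_ediv_cancel b (by omega)
    refine ⟨?_, ⟨b, by rw [hnum, mul_comm]⟩, by omega, by omega⟩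
    have : (0:Int) < b * (4*a + 3) := mul_pos (by omega) hden
    omega
  · rintro ⟨hpos, hdvd, hq1, hq2⟩
    set q := (s - 3*a) / (4*a + 3) with hqdef
    have hnum : (s - 3*a) / (4*a + 3) * (4*a + 3) = s - 3*a := Int.ediv_mul_cancel hdvd
    refine ⟨q, ⟨hq1, by omega⟩, ?_⟩
    have : q * (4*a + 3) = s - 3*a := hnum
    nlinarith [this]

theorem mem_iff_hit (s : Int) : pvAns.contains s = true ↔ pvHit s = true := by
  rw [mem_pvAns]
  simp only [pvHit, List.any_eq_true, PySem.List.mem_pyRange_one,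
    Bool.and_eq_true, decide_eq_true_eq]
  constructor
  · rintro ⟨a, ⟨ha1, ha2⟩, hb⟩
    have := (hit_cond a s ha1).mp hb
    exact ⟨a, ⟨ha1, ha2⟩, ⟨⟨this.1, this.2.1⟩, this.2.2.1⟩, this.2.2.2⟩
  · rintro ⟨a, ⟨ha1, ha2⟩, ⟨⟨h1, h2⟩, h3⟩, h4⟩
    exact ⟨a, ⟨ha1, ha2⟩, (hit_cond a s ha1).mpr ⟨h1, h2, h3, h4⟩⟩

-- ===== VERDICT (by name: the statement is the Claim_ definition above) =====
theorem solve_spec : Claim_equal_solve := by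
  intro N S _
  unfold Spec_solve solve solve_alt
  have hfg : (fun (c s : Int) => if pvAns.contains s then c + 1 else c)
      = (fun (c s : Int) => if pvHit s then c + 1 else c) := by
    funext c s
    by_cases h : pvAns.contains s = true
    · rw [if_pos h, if_pos ((mem_iff_hit s).mp h)]
    · rw [if_neg h, if_neg (fun hb => h ((mem_iff_hit s).mpr hb))]
  rw [hfg]
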